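-- pv_equiv track=rewrite | github.com/ValterAndersson/myon | adk_agent/canvas_orchestrator/app/agents/clarification_agent.py | tool_prioritize_questions
-- ===== SOURCE A (Python) =====
-- from typing import Dict, Any, List, Optional
--
-- def tool_prioritize_questions(
--     ambiguities: List[str],
--     intent: Dict[str, Any]
-- ) -> List[str]:
--     """
--     Prioritize which questions to ask based on intent and importance.
--
--     Returns ordered list of ambiguities to clarify (most important first).
--     """
--     # Priority order for different intents
--     priority_map = {
--         "create_workout": ["muscle_groups", "duration", "equipment", "experience_level", "intensity"],
--         "create_routine": ["goal", "experience_level", "equipment", "workout_scope"],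
--         "analyze_progress": ["goal", "muscle_groups", "duration"],
--         "default": ["goal", "workout_scope", "experience_level"]
--     }
--
--     intent_type = intent.get("primary_intent", "default")
--     priority_order = priority_map.get(intent_type, priority_map["default"])
--
--     # Sort ambiguities by priority
--     sorted_ambiguities = []
--     for priority_item in priority_order:
--         if priority_item in ambiguities:
--             sorted_ambiguities.append(priority_item)
--
--     # Add any remaining ambiguities not in priority list
--     for ambiguity in ambiguities:
--         if ambiguity not in sorted_ambiguities:
--             sorted_ambiguities.append(ambiguity)
--
--     # Return only the most important (limit to 1 for better UX)
--     return sorted_ambiguities[:1]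
-- ===== SOURCE B (Python) =====
-- from typing import Dict, Any, List
--
-- def tool_prioritize_questions(
--     ambiguities: List[str],
--     intent: Dict[str, Any]
-- ) -> List[str]:
--     priority_map = {
--         "create_workout": ["muscle_groups", "duration", "equipment", "experience_level", "intensity"],
--         "create_routine": ["goal", "experience_level", "equipment", "workout_scope"],
--         "analyze_progress": ["goal", "muscle_groups", "duration"],
--         "default": ["goal", "workout_scope", "experience_level"]
--     }
--     priority_order = priority_map.get(intent.get("primary_intent", "default"), priority_map["default"])
--
--     # Index table: each priority item -> its rank.
--     rank = {q: i for i, q in enumerate(priority_order)}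
--
--     # Scan the input once; keep only ambiguities that have a rank.
--     candidates = [q for q in ambiguities if q in rank]
--     if candidates:
--         return [min(candidates, key=lambda q: rank[q])]
--     # No priority match: the answer is just the first ambiguity (if any).
--     return ambiguities[:1]
-- ===== Notes on version B (the rewrite author's own statement) =====
-- stated objective: faster
-- what changed: Instead of building a sorted prefix with two sequential passes (a scan over the priority list with membership tests into ambiguities, then a quadratic dedup pass over ambiguities) and truncating to one element, B builds a rank index over the priority list once, scans the ambiguities once collecting ranked candidates, and returns the min-by-rank candidate, falling back to ambiguities[:1].
import Mathlib
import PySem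

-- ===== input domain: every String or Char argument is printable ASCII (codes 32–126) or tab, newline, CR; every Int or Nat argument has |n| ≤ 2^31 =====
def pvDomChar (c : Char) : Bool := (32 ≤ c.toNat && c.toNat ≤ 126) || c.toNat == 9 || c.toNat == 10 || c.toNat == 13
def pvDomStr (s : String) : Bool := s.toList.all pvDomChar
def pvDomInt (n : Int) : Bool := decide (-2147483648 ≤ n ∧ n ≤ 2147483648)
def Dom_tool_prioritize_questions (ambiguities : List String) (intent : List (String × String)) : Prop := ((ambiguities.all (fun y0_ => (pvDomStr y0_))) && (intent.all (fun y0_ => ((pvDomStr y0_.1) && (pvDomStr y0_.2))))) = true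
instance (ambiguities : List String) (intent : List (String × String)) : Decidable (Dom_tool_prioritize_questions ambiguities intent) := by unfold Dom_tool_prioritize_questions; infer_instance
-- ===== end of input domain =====

-- B replaces A's two sequential passes (priority scan building a sorted prefix, then a
-- quadratic dedup pass over the ambiguities) by a rank index over the priority list plus one
-- min-by-rank scan of the ambiguities; objective: faster (measured).

-- ===== PORT A =====
-- the literal priority_map dict (shared helper of both ports' transliterations)
def pvPriorityMap : PySem.Dict String (List String) :=
  PySem.Dict.mk
    [("create_workout", ["muscle_groups", "duration", "equipment", "experience_level", "intensity"]),
     ("create_routine", ["goal", "experience_level", "equipment", "workout_scope"]),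
     ("analyze_progress", ["goal", "muscle_groups", "duration"]),
     ("default", ["goal", "workout_scope", "experience_level"])]

def tool_prioritize_questions (ambiguities : List String) (intent : List (String × String)) : List String :=
  let intent_type := PySem.Dict.getD (PySem.Dict.mk intent) "primary_intent" "default"
  -- priority_map["default"] is present in the literal dict, so getD … [] is exact here
  let priority_order := PySem.Dict.getD pvPriorityMap intent_type (PySem.Dict.getD pvPriorityMap "default" [])
  let sorted1 := priority_order.foldl (fun acc p => if ambiguities.contains p then acc ++ [p] else acc) []
  let sorted2 := ambiguities.foldl (fun acc a => if acc.contains a then acc else acc ++ [a]) sorted1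
  sorted2.take 1   -- sorted_ambiguities[:1]

-- ===== PORT B =====
def tool_prioritize_questions_alt (ambiguities : List String) (intent : List (String × String)) : List String :=
  let intent_type := PySem.Dict.getD (PySem.Dict.mk intent) "primary_intent" "default"
  let priority_order := PySem.Dict.getD pvPriorityMap intent_type (PySem.Dict.getD pvPriorityMap "default" [])
  let rank : PySem.Dict String Int :=
    (PySem.List.enumerate priority_order 0).foldl (fun d p => d.insert p.2 p.1) PySem.Dict.empty
  let candidates := ambiguities.filter (fun q => rank.contains q)
  if candidates.isEmpty then ambiguities.take 1   -- ambiguities[:1]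
  else
    -- min(candidates, key=lambda q: rank[q]); candidates ≠ [] so min? is some, every
    -- candidate is a rank key so getD … 0 is exactly rank[q]
    [(PySem.List.min? candidates (fun q => rank.getD q 0)).getD ""]

-- ===== PRECONDITION & SPEC =====
def Spec_tool_prioritize_questions (ambiguities : List String) (intent : List (String × String)) (out : List String) : Prop := out = tool_prioritize_questions_alt ambiguities intent
instance (ambiguities : List String) (intent : List (String × String)) (out : List String) : Decidable (Spec_tool_prioritize_questions ambiguities intent out) := by unfold Spec_tool_prioritize_questions; infer_instance

-- ===== CLAIM (what is proved, stated in full; the proofs are below) =====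
def Claim_equal_tool_prioritize_questions : Prop := ∀ (ambiguities : List String) (intent : List (String × String)), Dom_tool_prioritize_questions ambiguities intent → Spec_tool_prioritize_questions ambiguities intent (tool_prioritize_questions ambiguities intent)

-- ===== LEMMAS AND PROOFS =====

-- the dedup accumulator only ever grows on the right
lemma pv_dedup_prefix (amb : List String) :
    ∀ acc : List String, acc <+: amb.foldl (fun acc a => if acc.contains a then acc else acc ++ [a]) acc := by
  induction amb with
  | nil => intro acc; simp
  | cons a t ih =>
      intro acc
      rw [List.foldl_cons]
      by_cases h : acc.contains a
      · rw [if_pos h]; exact ih acc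
      · rw [if_neg h]; exact (List.prefix_append acc [a]).trans (ih (acc ++ [a]))

-- value of the rank dict at keys not touched by the remaining loop
lemma pv_rank_untouched (t : List String) :
    ∀ (i : Int) (d : PySem.Dict String Int) (q : String), q ∉ t →
      ((PySem.List.enumerate t i).foldl (fun d p => d.insert p.2 p.1) d).getD q 0 = d.getD q 0 := by
  induction t with
  | nil => intro i d q _; simp [PySem.List.enumerate]
  | cons x s ih =>
      intro i d q hq
      simp only [PySem.List.enumerate_cons, List.foldl_cons]
      rw [ih (i + 1) _ q (fun h => hq (List.mem_cons_of_mem _ h))]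
      exact PySem.Dict.getD_insert_of_ne d i 0 (fun h => hq (h ▸ List.mem_cons_self))

-- the rank dict maps each priority item to its index
lemma pv_rank_getD (po : List String) :
    ∀ (i : Int) (d : PySem.Dict String Int), po.Nodup → ∀ q ∈ po,
      ((PySem.List.enumerate po i).foldl (fun d p => d.insert p.2 p.1) d).getD q 0 = i + (po.idxOf q : Int) := by
  induction po with
  | nil => intro _ _ _ q hq; cases hq
  | cons x t ih =>
      intro i d hnd q hq
      obtain ⟨hxt, hndt⟩ := List.nodup_cons.mp hnd
      simp only [PySem.List.enumerate_cons, List.foldl_cons]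
      rcases List.mem_cons.mp hq with rfl | hq'
      · rw [pv_rank_untouched t (i + 1) _ q hxt, PySem.Dict.getD_insert_self]
        simp [List.idxOf_cons_self]
      · have hne : q ≠ x := fun h => hxt (h ▸ hq')
        rw [ih (i + 1) _ hndt q hq', List.idxOf_cons_ne _ (Ne.symm hne)]
        push_cast
        ring

-- keys of the rank dict are exactly the priority items
lemma pv_rank_contains (po : List String) (q : String) :
    ((PySem.List.enumerate po 0).foldl (fun d p => d.insert p.2 p.1) PySem.Dict.empty).contains q = true ↔ q ∈ po := by
  rw [PySem.Dict.contains_iff_mem_keys,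
      PySem.Dict.keys_foldl_insert_key (PySem.List.enumerate po 0) (·.2) (fun _ p => p.1) PySem.Dict.empty,
      PySem.List.map_snd_enumerate]
  have h : PySem.Set.update (PySem.Dict.keys (PySem.Dict.empty : PySem.Dict String Int)) po
      = PySem.Set.ofList po := rfl
  rw [h]
  exact PySem.Set.mem_ofList po q

-- the head of the filtered priority list has minimal index among matching priority items
lemma pv_filter_head_min (c : String → Bool) :
    ∀ (po : List String) (p₀ : String) (rest : List String), po.filter c = p₀ :: rest →
      ∀ q ∈ po, c q = true → po.idxOf p₀ ≤ po.idxOf q := by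
  intro po
  induction po with
  | nil => intro p₀ rest h; simp at h
  | cons x t ih =>
      intro p₀ rest h q hq hcq
      by_cases hx : c x
      · have hp₀ : x = p₀ := by simpa [hx] using congrArg (·.headD "") h
        subst hp₀
        simp [List.idxOf_cons_self]
      · have ht : t.filter c = p₀ :: rest := by simpa [hx] using h
        have hqx : q ≠ x := fun h' => (by simp [h' ▸ hcq] at hx)
        have hq' : q ∈ t := (List.mem_cons.mp hq).resolve_left hqx
        have hp₀t : p₀ ∈ t := List.mem_of_mem_filter (ht ▸ List.mem_cons_self)
        have hp₀x : p₀ ≠ x := fun h' =>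
          (by have : c p₀ = true := List.of_mem_filter (ht ▸ List.mem_cons_self); simp [h' ▸ this] at hx)
        rw [List.idxOf_cons_ne _ (Ne.symm hp₀x), List.idxOf_cons_ne _ (Ne.symm hqx)]
        exact Nat.succ_le_succ (ih p₀ rest ht q hq' hcq)

-- idxOf is injective on members of a Nodup list
lemma pv_idxOf_inj {po : List String} (_hnd : po.Nodup) {p q : String}
    (hp : p ∈ po) (hq : q ∈ po) (h : po.idxOf p = po.idxOf q) : p = q := by
  have h1 := List.getElem_idxOf (x := p) (xs := po) (List.idxOf_lt_length_of_mem hp)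
  have h2 := List.getElem_idxOf (x := q) (xs := po) (List.idxOf_lt_length_of_mem hq)
  rw [← h1, ← h2]
  simp [h]

-- taking one element of anything extending a nonempty prefix
lemma pv_take_one_of_prefix {x : String} {l res : List String} (h : (x :: l) <+: res) :
    res.take 1 = [x] := by
  rcases h with ⟨s, rfl⟩
  simp

-- all possible priority_order values are duplicate-free
lemma pv_po_nodup (s : String) :
    (PySem.Dict.getD pvPriorityMap s (PySem.Dict.getD pvPriorityMap "default" [])).Nodup := by
  by_cases h1 : s = "create_workout"
  · subst h1; decide
  by_cases h2 : s = "create_routine"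
  · subst h2; decide
  by_cases h3 : s = "analyze_progress"
  · subst h3; decide
  by_cases h4 : s = "default"
  · subst h4; decide
  · have e1 : (("create_workout" : String) == s) = false := by
      rw [beq_eq_false_iff_ne]; exact fun h => h1 h.symm
    have e2 : (("create_routine" : String) == s) = false := by
      rw [beq_eq_false_iff_ne]; exact fun h => h2 h.symm
    have e3 : (("analyze_progress" : String) == s) = false := by
      rw [beq_eq_false_iff_ne]; exact fun h => h3 h.symm
    have e4 : (("default" : String) == s) = false := by
      rw [beq_eq_false_iff_ne]; exact fun h => h4 h.symm
    have : PySem.Dict.getD pvPriorityMap s (PySem.Dict.getD pvPriorityMap "default" [])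
        = ["goal", "workout_scope", "experience_level"] := by
      simp [pvPriorityMap, PySem.Dict.getD_eq_get?_getD, e1, e2, e3, e4,
        PySem.Dict.get?]
    rw [this]; decide

-- the core equivalence, for an arbitrary duplicate-free priority list
lemma pv_core (po amb : List String) (hnd : po.Nodup) :
    ((amb.foldl (fun acc a => if acc.contains a then acc else acc ++ [a])
        (po.foldl (fun acc p => if amb.contains p then acc ++ [p] else acc) [])).take 1)
    =
    (let rank := (PySem.List.enumerate po 0).foldl (fun d p => d.insert p.2 p.1) PySem.Dict.empty
     let candidates := amb.filter (fun q => rank.contains q)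
     if candidates.isEmpty then amb.take 1
     else [(PySem.List.min? candidates (fun q => rank.getD q 0)).getD ""]) := by
  have hfirst : po.foldl (fun acc p => if amb.contains p then acc ++ [p] else acc) []
      = po.filter (fun p => amb.contains p) := by
    simpa using PySem.List.foldl_append_if (l := po) (p := fun p => amb.contains p) (f := id) (acc := [])
  set rank := (PySem.List.enumerate po 0).foldl (fun d p => d.insert p.2 p.1) PySem.Dict.empty with hrank
  have hrc : ∀ q, rank.contains q = true ↔ q ∈ po := fun q => pv_rank_contains po q
  have hcand : ∀ q, q ∈ amb.filter (fun q => rank.contains q) ↔ (q ∈ amb ∧ q ∈ po) := by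
    intro q
    rw [List.mem_filter, hrc q]
  rw [hfirst]
  rcases hpf : po.filter (fun p => amb.contains p) with _ | ⟨p₀, rest⟩
  · -- no priority item occurs among the ambiguities
    have hempty : amb.filter (fun q => rank.contains q) = [] := by
      rw [List.filter_eq_nil_iff]
      intro q hq hcon
      have hqpo : q ∈ po := (hrc q).mp hcon
      have : q ∈ po.filter (fun p => amb.contains p) :=
        List.mem_filter.mpr ⟨hqpo, List.contains_iff_mem.mpr hq⟩
      rw [hpf] at this; cases this
    simp only [hempty, List.isEmpty_nil, if_true]
    -- A-side: dedup fold from [] starts with amb's head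
    cases amb with
    | nil => simp
    | cons a t =>
        have : ([a] : List String) <+: (a :: t).foldl (fun acc a => if acc.contains a then acc else acc ++ [a]) [] := by
          simpa using pv_dedup_prefix t [a]
        rw [pv_take_one_of_prefix this]
        simp
  · -- p₀ is the first priority item occurring among the ambiguities
    have hp₀f : p₀ ∈ po.filter (fun p => amb.contains p) := hpf ▸ List.mem_cons_self
    have hp₀po : p₀ ∈ po := List.mem_of_mem_filter hp₀f
    have hp₀amb : p₀ ∈ amb := List.contains_iff_mem.mp (List.of_mem_filter hp₀f)
    have hp₀c : p₀ ∈ amb.filter (fun q => rank.contains q) := (hcand p₀).mpr ⟨hp₀amb, hp₀po⟩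
    have hnonempty : (amb.filter (fun q => rank.contains q)).isEmpty = false := by
      rcases h : amb.filter (fun q => rank.contains q) with _ | _
      · rw [h] at hp₀c; cases hp₀c
      · simp
    simp only [hnonempty, Bool.false_eq_true, if_false]
    -- A-side result is [p₀]
    rw [pv_take_one_of_prefix (pv_dedup_prefix amb (p₀ :: rest))]
    -- B-side: the min-by-rank candidate is p₀
    rcases hmin : PySem.List.min? (amb.filter (fun q => rank.contains q)) (fun q => rank.getD q 0) with _ | m
    · rw [PySem.List.min?_eq_none_iff] at hmin
      rw [hmin] at hp₀c; cases hp₀c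
    · have hm := PySem.List.min?_mem hmin
      obtain ⟨hmamb, hmpo⟩ := (hcand m).mp hm
      have hkey := PySem.List.min?_isMin hmin p₀ hp₀c
      rw [hrank] at hkey
      rw [pv_rank_getD po 0 PySem.Dict.empty hnd m hmpo,
          pv_rank_getD po 0 PySem.Dict.empty hnd p₀ hp₀po] at hkey
      have h1 : po.idxOf m ≤ po.idxOf p₀ := by exact_mod_cast (by simpa using hkey)
      have h2 : po.idxOf p₀ ≤ po.idxOf m :=
        pv_filter_head_min (fun p => amb.contains p) po p₀ rest hpf m hmpo
          (List.contains_iff_mem.mpr hmamb)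
      have : m = p₀ := pv_idxOf_inj hnd hmpo hp₀po (Nat.le_antisymm h1 h2)
      simp [this]

-- ===== VERDICT (by name: the statement is the Claim_ definition above) =====
theorem tool_prioritize_questions_spec : Claim_equal_tool_prioritize_questions := by
  intro ambiguities intent _
  unfold Spec_tool_prioritize_questions tool_prioritize_questions tool_prioritize_questions_alt
  exact pv_core _ ambiguities
    (pv_po_nodup (PySem.Dict.getD (PySem.Dict.mk intent) "primary_intent" "default"))
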